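-- pv_equiv track=rewrite | github.com/Vedqiibyol/MarkRight | main-2022-11-23.py | IsRL
-- ===== SOURCE A (Python) =====
-- _reserved = " \t\n\r\"!#$%&'()*+,-./:;<=>?@[\]^_`{|}~"
--
-- def IsRL(data) -> tuple[bool, int, str]:
-- 	cnt = 0
-- 	txt = ''
-- 	end = data.find(']:')
--
-- 	if data[0] == '[' and end != -1:
-- 		txt = data[1:end]
-- 		for i in txt:
-- 			if i in _reserved: return [False, -1, None]
-- 			cnt += 1
-- 		return [True, cnt + 3, txt]
--
-- 	return [False, -1, None]
-- ===== SOURCE B (Python) =====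
-- _reserved = " \t\n\r\"!#$%&'()*+,-./:;<=>?@[\]^_`{|}~"
--
-- def IsRL(data) -> tuple[bool, int, str]:
-- 	# one forward scan: consume label chars after '[', then expect ']:'
-- 	if not data.startswith('['):
-- 		return [False, -1, None]
-- 	txt = []
-- 	i = 1
-- 	while i < len(data) and data[i] not in _reserved:
-- 		txt.append(data[i])
-- 		i += 1
-- 	if data[i:i+2] == ']:':
-- 		t = ''.join(txt)
-- 		return [True, len(t) + 3, t]
-- 	return [False, -1, None]
-- ===== Notes on version B (the rewrite author's own statement) =====
-- stated objective: simpler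
-- what changed: A finds ']:' anywhere in the string, slices out the candidate label, then runs a second validation loop over it; B makes one forward scan that consumes non-reserved characters after '[' and then simply checks that the two characters at the stop position are ']:'.
import Mathlib
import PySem

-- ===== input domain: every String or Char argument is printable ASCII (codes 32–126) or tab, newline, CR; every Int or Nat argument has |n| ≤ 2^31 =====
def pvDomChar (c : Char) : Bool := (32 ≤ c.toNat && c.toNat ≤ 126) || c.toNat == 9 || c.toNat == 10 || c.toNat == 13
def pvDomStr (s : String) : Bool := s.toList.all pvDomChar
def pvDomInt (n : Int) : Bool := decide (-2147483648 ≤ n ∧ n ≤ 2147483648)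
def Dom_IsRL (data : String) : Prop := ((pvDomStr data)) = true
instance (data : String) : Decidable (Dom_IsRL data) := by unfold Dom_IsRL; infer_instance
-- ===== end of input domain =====

-- B replaces A's find-then-slice-then-validate passes by a single forward scan (simpler, one pass over the prefix).
-- A raises IndexError on empty input (data[0]); Pre_ excludes the empty string (B itself simply returns [False, -1, None] there).

-- ===== PORT A =====
def pvReserved : List Char := " \t\n\r\"!#$%&'()*+,-./:;<=>?@[\\]^_`{|}~".toList

-- the 'for i in txt' validation loop of A (early return on a reserved char)
def pvLoopA : List Char → Int → List Char → Bool × Int × Option String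
  | [], cnt, txt => (true, cnt + 3, some (String.ofList txt))
  | c :: rest, cnt, txt =>
      if pvReserved.contains c then (false, -1, none)
      else pvLoopA rest (cnt + 1) txt

def IsRL (data : String) : Bool × Int × Option String :=
  let l := data.toList
  let endI : Int := PySem.Chars.find l "]:".toList
  match PySem.List.pyGet? l 0 with
  | none => (false, -1, none)      -- data[0] raises IndexError in Python; excluded by Pre_IsRL
  | some c0 =>
      if c0 = '[' ∧ endI ≠ -1 then
        let txt := PySem.List.slice l (some 1) (some endI)
        pvLoopA txt 0 txt
      else (false, -1, none)

-- ===== PORT B =====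
-- the while loop of B: append non-reserved chars to txt, stop at the first reserved one (or the end)
def pvScanB : List Char → List Char → List Char × List Char
  | [], acc => (acc, [])
  | c :: rest, acc =>
      if pvReserved.contains c then (acc, c :: rest)
      else pvScanB rest (acc ++ [c])

def IsRL_alt (data : String) : Bool × Int × Option String :=
  let l := data.toList
  if PySem.Chars.startswith l ['['] then
    let sr := pvScanB l.tail []
    if sr.2.take 2 = [']', ':'] then            -- data[i:i+2] == ']:'
      (true, PySem.List.len sr.1 + 3, some (String.ofList sr.1))
    else (false, -1, none)
  else (false, -1, none)

-- ===== PRECONDITION & SPEC =====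
-- Pre_ excludes only the empty string, on which A raises IndexError at data[0].
def Pre_IsRL (data : String) : Prop := data ≠ ""
instance (data : String) : Decidable (Pre_IsRL data) := by unfold Pre_IsRL; infer_instance
def pvWitness_IsRL : String := "[ab]:x"

def Spec_IsRL (data : String) (out : Bool × Int × Option String) : Prop := out = IsRL_alt data
instance (data : String) (out : Bool × Int × Option String) : Decidable (Spec_IsRL data out) := by unfold Spec_IsRL; infer_instance

-- ===== CLAIM (what is proved, stated in full; the proofs are below) =====
def Claim_equal_IsRL : Prop := ∀ (data : String), Dom_IsRL data → Pre_IsRL data → Spec_IsRL data (IsRL data)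

-- ===== LEMMAS AND PROOFS =====

def pvOk (c : Char) : Bool := !pvReserved.contains c

theorem pvScanB_eq (l acc : List Char) :
    pvScanB l acc = (acc ++ l.takeWhile pvOk, l.dropWhile pvOk) := by
  induction l generalizing acc with
  | nil => simp [pvScanB]
  | cons c t ih =>
      by_cases h : c ∈ pvReserved <;>
        simp [pvScanB, ih, pvOk, h]

theorem pvLoopA_clean (rem : List Char) (cnt : Int) (txt : List Char)
    (h : ∀ c ∈ rem, c ∉ pvReserved) :
    pvLoopA rem cnt txt = (true, cnt + rem.length + 3, some (String.ofList txt)) := by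
  induction rem generalizing cnt with
  | nil => simp [pvLoopA]
  | cons c t ih =>
      have hc := h c (by simp)
      rw [pvLoopA, if_neg (by simpa using hc), ih _ (fun x hx => h x (by simp [hx]))]
      refine congrArg (fun z => ((true : Bool), z, some (String.ofList txt))) ?_
      simp only [List.length_cons]; push_cast; ring

theorem pvLoopA_hit (p : List Char) (c : Char) (s : List Char) (cnt : Int) (txt : List Char)
    (hp : ∀ x ∈ p, x ∉ pvReserved) (hc : c ∈ pvReserved) :
    pvLoopA (p ++ c :: s) cnt txt = (false, -1, none) := by
  induction p generalizing cnt with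
  | nil => simp [pvLoopA, hc]
  | cons x t ih =>
      have hx := hp x (by simp)
      rw [List.cons_append, pvLoopA, if_neg (by simpa using hx)]
      exact ih (cnt + 1) (fun y hy => hp y (List.mem_cons_of_mem _ hy))

-- A's find points at the first occurrence: the characterisation used in both branches
theorem pvFind_eq (l sub : List Char) (k : Nat)
    (h1 : sub <+: l.drop k) (h2 : ∀ i < k, ¬ sub <+: l.drop i) :
    PySem.Chars.find l sub = (k : Int) := by
  have hinf : sub <:+: l := List.infix_iff_prefix_suffix.mpr ⟨l.drop k, h1, List.drop_suffix k l⟩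
  have hnn : 0 ≤ PySem.Chars.find l sub := (PySem.Chars.find_nonneg_iff l sub).mpr hinf
  obtain ⟨hpre, hmin⟩ := @PySem.Chars.find_spec l sub hnn
  have : (PySem.Chars.find l sub).toNat = k := by
    rcases lt_trichotomy (PySem.Chars.find l sub).toNat k with hlt | heq | hgt
    · exact absurd hpre (h2 _ hlt)
    · exact heq
    · exact absurd h1 (hmin k hgt)
  omega

theorem prefix_head (xs : List Char) (a b : Char) (h : [a, b] <+: xs) :
    ∃ t, xs = a :: b :: t := by
  obtain ⟨t, ht⟩ := h
  exact ⟨t, ht.symm⟩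

theorem pvOk_ne_rbracket (c : Char) (h : pvOk c = true) : c ≠ ']' := by
  intro hEq; subst hEq; revert h; decide

theorem main_equiv (data : String) (h : data ≠ "") : IsRL data = IsRL_alt data := by
  have hsubL : "]:".toList = [']', ':'] := by decide
  obtain ⟨c0, rest, hl⟩ : ∃ c0 rest, data.toList = c0 :: rest := by
    cases hl : data.toList with
    | nil => exact absurd (String.toList_eq_nil_iff.mp hl) h
    | cons a b => exact ⟨a, b, rfl⟩
  unfold IsRL IsRL_alt
  simp only [hl, hsubL, PySem.List.pyGet?_zero_cons]
  by_cases hc0 : c0 = '['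
  · subst hc0
    have hsw : PySem.Chars.startswith ('[' :: rest) ['['] = true :=
      (PySem.Chars.startswith_iff _ _).mpr ⟨rest, rfl⟩
    simp only [hsw, if_true, List.tail_cons, pvScanB_eq, List.nil_append]
    obtain ⟨p, r, hpdef, hrdef⟩ :
        ∃ p r, p = rest.takeWhile pvOk ∧ r = rest.dropWhile pvOk := ⟨_, _, rfl, rfl⟩
    rw [← hpdef, ← hrdef]
    have hpr : p ++ r = rest := by rw [hpdef, hrdef]; exact List.takeWhile_append_dropWhile
    have hpOk : ∀ c ∈ p, pvOk c = true := by
      intro c hc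
      rw [hpdef] at hc
      exact List.mem_takeWhile_imp hc
    have hpclean : ∀ c ∈ p, c ∉ pvReserved := fun c hc => by simpa [pvOk] using hpOk c hc
    have hpne : ∀ j (hj : j < p.length), p[j] ≠ ']' := fun j hj =>
      pvOk_ne_rbracket _ (hpOk _ (List.getElem_mem hj))
    -- the char at index j of rest (j < p.length) is not ']'
    have hRestNe : ∀ j (_ : j < p.length) t, (p ++ r).drop j ≠ ']' :: t := by
      intro j hj t ht
      have h0 : ((p ++ r).drop j)[0]? = some ']' := by rw [ht]; rfl
      rw [List.getElem?_drop, List.getElem?_append_left (by omega),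
          List.getElem?_eq_getElem (by omega)] at h0
      exact hpne j (by omega) (by simpa using h0)
    by_cases hsucc : r.take 2 = [']', ':']
    · -- both sides succeed
      obtain ⟨t2, ht2⟩ : ∃ t2, r = ']' :: ':' :: t2 := by
        cases r with
        | nil => exact absurd hsucc (by simp)
        | cons a s =>
          cases s with
          | nil => exact absurd hsucc (by simp)
          | cons b t =>
            have h2 : (2 : Nat) = 1 + 1 := rfl
            rw [h2, List.take_succ_cons, List.take_succ_cons, List.take_zero] at hsucc
            simp only [List.cons.injEq, and_true] at hsucc
            exact ⟨t, by rw [hsucc.1, hsucc.2]⟩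
      rw [if_pos hsucc]
      have hfind : PySem.Chars.find ('[' :: rest) [']', ':'] = ((p.length + 1 : Nat) : Int) := by
        apply pvFind_eq
        · simp only [List.drop_succ_cons, ← hpr, List.drop_left, ht2]
          exact ⟨t2, rfl⟩
        · intro i hi hpre
          obtain ⟨t, ht⟩ := prefix_head _ _ _ hpre
          cases i with
          | zero => simp at ht
          | succ j =>
            rw [List.drop_succ_cons, ← hpr] at ht
            exact hRestNe j (by omega) _ ht
      rw [hfind, if_pos ⟨by trivial, by omega⟩]
      have hslice : PySem.List.slice ('[' :: rest) (some 1) (some ((p.length + 1 : Nat) : Int)) = p := by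
        rw [PySem.List.slice_toNat _ (by omega) (by omega)]
        simp only [Int.toNat_one, Int.toNat_natCast, List.drop_one, List.tail_cons,
          Nat.add_sub_cancel, ← hpr]
        exact List.take_left (l₁ := p) (l₂ := r)
      rw [hslice, pvLoopA_clean p 0 p hpclean]
      simp [PySem.List.len_eq]
    · -- both sides fail
      rw [if_neg hsucc]
      by_cases hfind : PySem.Chars.find ('[' :: rest) [']', ':'] = -1
      · rw [if_neg (by simp [hfind])]
      · have hnn : 0 ≤ PySem.Chars.find ('[' :: rest) [']', ':'] := by
          have := PySem.Chars.neg_one_le_find ('[' :: rest) [']', ':']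
          omega
        obtain ⟨hpre, hmin⟩ := @PySem.Chars.find_spec ('[' :: rest) [']', ':'] hnn
        obtain ⟨k, hkdef⟩ : ∃ k : Nat, (PySem.Chars.find ('[' :: rest) [']', ':']).toNat = k :=
          ⟨_, rfl⟩
        rw [hkdef] at hpre hmin
        obtain ⟨t, ht⟩ := prefix_head _ _ _ hpre
        -- k ≥ p.length + 2
        have hk : p.length + 2 ≤ k := by
          by_contra hlt
          cases hKn : k with
          | zero => rw [hKn, List.drop_zero] at ht; simp at ht
          | succ j =>
            rw [hKn, List.drop_succ_cons, ← hpr] at ht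
            rcases Nat.lt_or_ge j p.length with hjp | hjp
            · exact hRestNe j hjp _ ht
            · have hjq : j = p.length := by omega
              rw [hjq, List.drop_left] at ht
              rw [ht] at hsucc
              exact hsucc (by simp)
        have hklt : k < ('[' :: rest).length := by
          by_contra hge
          rw [List.drop_eq_nil_of_le (by omega)] at ht
          simp at ht
        have hrne : r ≠ [] := by
          intro hrnil
          have : rest.length = p.length := by
            rw [← hpr, hrnil]; simp
          simp [this] at hklt
          omega
        obtain ⟨rh, rt, hrc⟩ : ∃ rh rt, r = rh :: rt := by
          cases r with
          | nil => exact absurd rfl hrne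
          | cons a s => exact ⟨a, s, rfl⟩
        have hrh : rh ∈ pvReserved := by
          have hne' : rest.dropWhile pvOk ≠ [] := by rw [← hrdef, hrc]; simp
          have hhd := List.head_dropWhile_not pvOk hne'
          have hv : (rest.dropWhile pvOk).head hne' = rh := by
            have : rest.dropWhile pvOk = rh :: rt := by rw [← hrdef, hrc]
            simp only [this, List.head_cons]
          rw [hv] at hhd
          simpa [pvOk] using hhd
        rw [if_pos ⟨by trivial, hfind⟩]
        have hFeq : PySem.Chars.find ('[' :: rest) [']', ':'] = ((k : Nat) : Int) := by omega
        rw [hFeq, PySem.List.slice_toNat _ (by omega) (by omega)]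
        simp only [Int.toNat_one, Int.toNat_natCast, List.drop_one, List.tail_cons, ← hpr]
        obtain ⟨m, hm⟩ : ∃ m, k - 1 = p.length + (m + 1) := ⟨k - p.length - 2, by omega⟩
        rw [hm, List.take_length_add_append, hrc, List.take_succ_cons]
        exact pvLoopA_hit p rh _ 0 _ hpclean hrh
  · -- first char is not '['
    have hsw : PySem.Chars.startswith (c0 :: rest) ['['] = false := by
      rw [← Bool.not_eq_true, PySem.Chars.startswith_iff]
      intro hpre
      obtain ⟨t, ht⟩ := hpre
      injection ht with h1 _
      exact hc0 h1.symm
    rw [if_neg (by simp [hc0]), hsw, if_neg (by simp)]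

-- ===== VERDICT (by name: the statement is the Claim_ definition above) =====
theorem IsRL_spec : Claim_equal_IsRL := by
  intro data _ hpre
  unfold Spec_IsRL
  exact main_equiv data hpre
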